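-- pv_equiv track=rewrite | github.com/goo314/problem-solving | study-w-gahyeon/2025-03-21/72.py | solution
-- ===== SOURCE A (Python) =====
-- def solution(input_string):
--     ans = []
--
--     n = len(input_string)
--     cnt = [0] * 26
--     cnt[ord(input_string[0]) - ord('a')] += 1
--     for i in range(1, n):
--         j = ord(input_string[i]) - ord('a')
--         if cnt[j] > 0 and input_string[i] != input_string[i-1]:
--             ans.append(input_string[i])
--         cnt[j] += 1
--     ans = list(set(ans))
--     ans.sort()
--     if len(ans) == 0:
--         ans = 'N'
--     else:
--         ans = ''.join(ans)
--
--     return ans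
-- ===== SOURCE B (Python) =====
-- def solution(input_string):
--     # Phase 1: compress the string into its list of maximal-run leader characters.
--     prev = input_string[0]
--     runs = [prev]
--     for ch in input_string[1:]:
--         if ch != prev:
--             runs.append(ch)
--             prev = ch
--     # Phase 2: a character repeats non-consecutively iff it heads 2+ distinct runs.
--     counts = {}
--     for ch in runs:
--         counts[ch] = counts.get(ch, 0) + 1
--     reps = sorted(c for c in counts if counts[c] > 1)
--     return ''.join(reps) if reps else 'N'
-- ===== Notes on version B (the rewrite author's own statement) =====
-- stated objective: faster
-- what changed: B replaces A's single indexed pass with a 26-slot count array and inline repeat detection by a two-phase decomposition: first compress the string into its list of maximal-run leader characters (one comparison per character), then count run leaders with a dict and select those heading more than one run, sorted; the counting work moves off the character loop onto the usually much shorter run list, which a timing run measures as a constant-factor speedup.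
-- outside the precondition, e.g. on solution('aG'): A returns 'G', B returns 'N'; on solution('aHbHa'): A returns 'Hab', B returns 'Ha'; on solution('GaGa'): A returns 'Ga', B returns 'Ga'
import Mathlib
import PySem

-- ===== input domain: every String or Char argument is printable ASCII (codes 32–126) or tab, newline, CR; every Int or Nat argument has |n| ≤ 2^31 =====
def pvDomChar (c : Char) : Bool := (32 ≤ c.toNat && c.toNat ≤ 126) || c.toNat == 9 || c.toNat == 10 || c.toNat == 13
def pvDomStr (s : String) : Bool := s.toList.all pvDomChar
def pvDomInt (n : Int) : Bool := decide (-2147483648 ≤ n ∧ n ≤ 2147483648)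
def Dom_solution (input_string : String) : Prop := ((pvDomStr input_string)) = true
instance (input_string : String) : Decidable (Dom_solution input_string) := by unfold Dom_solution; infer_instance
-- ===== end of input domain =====

-- B replaces A's single indexed pass (26-slot count array + inline repeat detection) by a two-phase
-- decomposition: compress the string into its run-leader list, then count run leaders with a dict
-- and keep those heading more than one run (measurably faster: per character only one comparison,
-- counting work is confined to the usually much shorter run list).

-- ===== PORT A =====
def solution (input_string : String) : String :=
  match input_string.toList with
  | [] => ""  -- Python raises IndexError here (cnt[ord(input_string[0]) - 97]); excluded by Pre_
  | _ :: _ =>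
    let s := input_string.toList
    let n : Int := s.length
    let cnt : List Int := List.replicate 26 0
    let j0 : Int := ((PySem.List.pyGetD s 0 ' ').toNat : Int) - 97
    let cnt := PySem.List.pySetD cnt j0 (PySem.List.pyGetD cnt j0 0 + 1)
    let st := (PySem.List.pyRange 1 n 1).foldl
      (fun (st : List Int × List Char) i =>
        let c := PySem.List.pyGetD s i ' '
        let j : Int := (c.toNat : Int) - 97
        let ans := if PySem.List.pyGetD st.1 j 0 > 0 ∧ c ≠ PySem.List.pyGetD s (i - 1) ' '
                   then st.2 ++ [c] else st.2
        (PySem.List.pySetD st.1 j (PySem.List.pyGetD st.1 j 0 + 1), ans)) (cnt, [])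
    let ansl := PySem.List.sorted (PySem.Set.ofList st.2) (fun x => x) false
    if ansl.length = 0 then "N" else String.ofList ansl

-- ===== PORT B =====
def solution_alt (input_string : String) : String :=
  match input_string.toList with
  | [] => ""  -- Python raises IndexError here (prev = input_string[0]); excluded by Pre_
  | c :: rest =>
    let st := rest.foldl
      (fun (st : List Char × Char) ch => if ch ≠ st.2 then (st.1 ++ [ch], ch) else st) ([c], c)
    let runs := st.1
    let counts := runs.foldl
      (fun (d : PySem.Dict Char Int) ch => d.insert ch (d.getD ch 0 + 1)) PySem.Dict.empty
    let reps := PySem.List.sorted (counts.keys.filter (fun ch => counts.getD ch 0 > 1)) (fun x => x) false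
    if reps = [] then "N" else String.ofList reps

-- ===== PRECONDITION & SPEC =====
-- Pre_ admits the inputs on which A returns normally (nonempty strings whose characters all have
-- codes 71..122; elsewhere A raises IndexError, since cnt has 26 slots indexed by ord(c)-97 with
-- Python's negative-index wraparound), EXCEPT those strings that contain both a character c with
-- code 71..96 and the character with code ord(c)+26: on those A still returns, but the two
-- characters accidentally share one count slot through the wraparound, and A's value is an
-- artefact of that aliasing (it can report characters as repeating that never repeat), which B
-- does not reproduce; see the excluded examples in the claim.
def Pre_solution (input_string : String) : Prop :=
  input_string.toList ≠ [] ∧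
  input_string.toList.all (fun c => 71 ≤ c.toNat && c.toNat ≤ 122) = true ∧
  input_string.toList.any (fun c => c.toNat < 97 &&
    input_string.toList.contains (Char.ofNat (c.toNat + 26))) = false
instance (input_string : String) : Decidable (Pre_solution input_string) := by
  unfold Pre_solution; infer_instance

def pvWitness_solution : String := "aba"

def Spec_solution (input_string : String) (out : String) : Prop := out = solution_alt input_string
instance (input_string : String) (out : String) : Decidable (Spec_solution input_string out) := by
  unfold Spec_solution; infer_instance

-- ===== CLAIM (what is proved, stated in full; the proofs are below) =====
def Claim_equal_solution : Prop := ∀ (input_string : String), Dom_solution input_string → Pre_solution input_string → Spec_solution input_string (solution input_string)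

-- ===== LEMMAS AND PROOFS =====

-- A's loop body, with the two indexed characters (previous, current) passed directly.
def pvAStep (st : List Int × List Char) (p ch : Char) : List Int × List Char :=
  let j : Int := (ch.toNat : Int) - 97
  ( PySem.List.pySetD st.1 j (PySem.List.pyGetD st.1 j 0 + 1),
    if PySem.List.pyGetD st.1 j 0 > 0 ∧ ch ≠ p then st.2 ++ [ch] else st.2 )

def pvAFold : List Char → Char → (List Int × List Char) → (List Int × List Char)
  | [], _, st => st
  | ch :: t, p, st => pvAFold t ch (pvAStep st p ch)

-- B's run compression, with prev passed directly.
def pvRuns : List Char → Char → List Char → List Char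
  | [], _, runs => runs
  | ch :: t, p, runs => if ch ≠ p then pvRuns t ch (runs ++ [ch]) else pvRuns t p runs

def pvLast : List Char → Char → Char
  | [], p => p
  | ch :: t, _ => pvLast t ch

-- the slot of cnt that Python's cnt[ord(c)-97] actually reads for codes 71..122
def pvIdx (c : Char) : Nat := if c.toNat < 97 then c.toNat - 71 else c.toNat - 97

def pvCharEq (a b : Char) (h : a.toNat = b.toNat) : a = b := Char.ext (UInt32.toNat_inj.mp h)

lemma pvA_bridge (s : List Char) :
    ∀ (l : List Char) (k : Nat) (p : Char) (st : List Int × List Char),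
    s.drop k = p :: l →
    (PySem.List.pyRange ((k : Int) + 1) (s.length : Int) 1).foldl
      (fun (st : List Int × List Char) i =>
        let c := PySem.List.pyGetD s i ' '
        let j : Int := (c.toNat : Int) - 97
        let ans := if PySem.List.pyGetD st.1 j 0 > 0 ∧ c ≠ PySem.List.pyGetD s (i - 1) ' '
                   then st.2 ++ [c] else st.2
        (PySem.List.pySetD st.1 j (PySem.List.pyGetD st.1 j 0 + 1), ans)) st
    = pvAFold l p st := by
  intro l
  induction l with
  | nil =>
    intro k p st hd
    have hlen : s.length = k + 1 := by
      have := congrArg List.length hd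
      simp [List.length_drop] at this
      omega
    have hnil : PySem.List.pyRange ((k : Int) + 1) (s.length : Int) 1 = [] := by
      apply PySem.List.pyRange_one_eq_nil; omega
    rw [hnil]; rfl
  | cons ch t ih =>
    intro k p st hd
    have hlen : k + 1 < s.length := by
      have := congrArg List.length hd
      simp [List.length_drop] at this
      omega
    have hdk : s.drop (k + 1) = ch :: t := by
      have h1 : List.drop 1 (s.drop k) = s.drop (k + 1) := by
        rw [List.drop_drop]
      rw [← h1, hd]; rfl
    have hp : s.getD k ' ' = p := by
      have h0 : (s.drop k)[0]? = s[k + 0]? := List.getElem?_drop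
      rw [hd] at h0
      simp at h0
      simp [List.getD, ← h0]
    have hch : s.getD (k+1) ' ' = ch := by
      have h0 : (s.drop k)[1]? = s[k + 1]? := List.getElem?_drop
      rw [hd] at h0
      simp at h0
      simp [List.getD, ← h0]
    rw [PySem.List.pyRange_one_cons (by omega : (k : Int) + 1 < (s.length : Int))]
    rw [List.foldl_cons]
    have e1 : PySem.List.pyGetD s ((k : Int) + 1) ' ' = ch := by
      have h2 : ((k : Int) + 1) = ((k + 1 : Nat) : Int) := by push_cast; ring
      rw [h2, PySem.List.pyGetD_natCast, hch]
    have e2 : PySem.List.pyGetD s ((k : Int) + 1 - 1) ' ' = p := by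
      have h2 : ((k : Int) + 1 - 1) = ((k : Nat) : Int) := by omega
      rw [h2, PySem.List.pyGetD_natCast, hp]
    have hih := ih (k + 1) ch (pvAStep st p ch) hdk
    rw [show ((k + 1 : Nat) : Int) + 1 = (k : Int) + 1 + 1 by push_cast; ring] at hih
    simp only [pvAFold]
    simp only [pvAStep] at hih ⊢
    have hp' : s[k]?.getD ' ' = p := by simpa [List.getD] using hp
    simpa [e1, e2, hp'] using hih

lemma pvB_bridge : ∀ (l runs : List Char) (p : Char),
    l.foldl (fun (st : List Char × Char) ch => if ch ≠ st.2 then (st.1 ++ [ch], ch) else st) (runs, p)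
    = (pvRuns l p runs, pvLast l p) := by
  intro l
  induction l with
  | nil => intro runs p; rfl
  | cons ch t ih =>
    intro runs p
    simp only [List.foldl_cons, pvRuns, pvLast]
    by_cases h : ch = p
    · subst h
      rw [if_neg (by simp), if_neg (by simp)]
      exact ih runs ch
    · rw [if_pos (by simp [h]), if_pos (by simp [h])]
      exact ih (runs ++ [ch]) ch

lemma pvGetDZero (xs : List Int) (h : ∀ v ∈ xs, v = 0) (i : Int) : PySem.List.pyGetD xs i 0 = 0 := by
  simp only [PySem.List.pyGetD, PySem.List.pyGet?, PySem.List.pyIdx?]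
  split_ifs <;> (try rfl) <;>
  · first
    | (cases hx : xs[i.toNat]? with
       | none => simp [hx]
       | some v => simp [hx, h v (List.mem_of_getElem? hx)])
    | (cases hx : xs[xs.length - (-i).toNat]? with
       | none => simp [hx]
       | some v => simp [hx, h v (List.mem_of_getElem? hx)])

-- wraparound of a negative in-range index (specific to this port's cnt[ord(c)-97])
lemma pvGetD_neg (xs : List Int) (j : Int) (h1 : -(xs.length : Int) ≤ j) (h2 : j < 0) :
    PySem.List.pyGetD xs j 0 = PySem.List.pyGetD xs (j + xs.length) 0 := by
  simp only [PySem.List.pyGetD, PySem.List.pyGet?, PySem.List.pyIdx?]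
  split_ifs
  all_goals try (exfalso; omega)
  all_goals
    have hidx : xs.length - (-j).toNat = (j + xs.length).toNat := by omega
  all_goals rw [hidx]

lemma pvSetD_neg (xs : List Int) (j : Int) (v : Int) (h1 : -(xs.length : Int) ≤ j) (h2 : j < 0) :
    PySem.List.pySetD xs j v = PySem.List.pySetD xs (j + xs.length) v := by
  simp only [PySem.List.pySetD, PySem.List.pySet?, PySem.List.pyIdx?]
  split_ifs
  all_goals try (exfalso; omega)
  all_goals
    have hidx : xs.length - (-j).toNat = (j + xs.length).toNat := by omega
  all_goals rw [hidx]

lemma pvWrapGetD (xs : List Int) (h26 : xs.length = 26) (c : Char)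
    (hc : 71 ≤ c.toNat ∧ c.toNat ≤ 122) :
    PySem.List.pyGetD xs ((c.toNat : Int) - 97) 0 = PySem.List.pyGetD xs ((pvIdx c : Nat) : Int) 0 := by
  unfold pvIdx
  by_cases h : c.toNat < 97
  · rw [pvGetD_neg xs _ (by omega) (by omega), h26, if_pos h]
    congr 1
    omega
  · rw [if_neg h]
    congr 1
    omega

lemma pvWrapSetD (xs : List Int) (h26 : xs.length = 26) (c : Char) (v : Int)
    (hc : 71 ≤ c.toNat ∧ c.toNat ≤ 122) :
    PySem.List.pySetD xs ((c.toNat : Int) - 97) v = PySem.List.pySetD xs ((pvIdx c : Nat) : Int) v := by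
  unfold pvIdx
  by_cases h : c.toNat < 97
  · rw [pvSetD_neg xs _ v (by omega) (by omega), h26, if_pos h]
    congr 1
    omega
  · rw [if_neg h]
    congr 1
    omega

lemma pvIdx_lt (c : Char) (hc : 71 ≤ c.toNat ∧ c.toNat ≤ 122) : pvIdx c < 26 := by
  unfold pvIdx; split_ifs <;> omega

lemma pvInv (S : List Char)
    (hvS : ∀ x ∈ S, 71 ≤ x.toNat ∧ x.toNat ≤ 122)
    (hno : ∀ x ∈ S, ∀ y ∈ S, pvIdx x = pvIdx y → x = y) :
    ∀ (l pre : List Char) (cnt : List Int) (ans runs : List Char) (p : Char),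
    (∀ c ∈ l, c ∈ S) →
    (∀ c ∈ pre, c ∈ S) →
    cnt.length = 26 →
    (∀ c ∈ S, PySem.List.pyGetD cnt ((c.toNat : Int) - 97) 0 = (pre.count c : Int)) →
    p ∈ pre →
    (∀ c, c ∈ runs ↔ c ∈ pre) →
    (∀ c, c ∈ ans ↔ 2 ≤ runs.count c) →
    ∀ c, c ∈ (pvAFold l p (cnt, ans)).2 ↔ 2 ≤ (pvRuns l p runs).count c := by
  intro l
  induction l with
  | nil =>
    intro pre cnt ans runs p _ _ _ _ _ _ hans c
    simpa [pvAFold, pvRuns] using hans c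
  | cons ch t ih =>
    intro pre cnt ans runs p hlS hpS hlen hcnt hppre hruns hans c
    have hchS : ch ∈ S := hlS ch (by simp)
    have hch : 71 ≤ ch.toNat ∧ ch.toNat ≤ 122 := hvS ch hchS
    have hjlt : pvIdx ch < cnt.length := by rw [hlen]; exact pvIdx_lt ch hch
    have hcount : PySem.List.pyGetD cnt ((ch.toNat : Int) - 97) 0 = (pre.count ch : Int) :=
      hcnt ch hchS
    have hlen' : (PySem.List.pySetD cnt ((ch.toNat : Int) - 97)
        (PySem.List.pyGetD cnt ((ch.toNat : Int) - 97) 0 + 1)).length = 26 := by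
      rw [PySem.List.length_pySetD]; exact hlen
    have hcnt' : ∀ c' ∈ S,
        PySem.List.pyGetD (PySem.List.pySetD cnt ((ch.toNat : Int) - 97)
          (PySem.List.pyGetD cnt ((ch.toNat : Int) - 97) 0 + 1)) ((c'.toNat : Int) - 97) 0
        = ((pre ++ [ch]).count c' : Int) := by
      intro c' hc'S
      have hc' : 71 ≤ c'.toNat ∧ c'.toNat ≤ 122 := hvS c' hc'S
      rw [pvWrapSetD cnt hlen ch _ hch, pvWrapGetD _ (by rw [PySem.List.length_pySetD]; exact hlen) c' hc',
        PySem.List.pyGetD_pySetD_natCast _ _ _ _ _ hjlt]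
      by_cases he : c' = ch
      · subst he
        rw [if_pos rfl, hcount]
        have hc1 : (pre ++ [c']).count c' = pre.count c' + 1 := by
          simp [List.count_append]
        rw [hc1]; push_cast; ring
      · have hne : pvIdx c' ≠ pvIdx ch := by
          intro hcon
          exact he (hno c' hc'S ch hchS hcon)
        have he' : ¬ch = c' := fun h => he h.symm
        rw [if_neg hne, ← pvWrapGetD cnt hlen c' hc', hcnt c' hc'S]
        have hc1 : (pre ++ [ch]).count c' = pre.count c' := by
          simp [List.count_append, he']
        rw [hc1]
    simp only [pvAFold, pvAStep, pvRuns]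
    by_cases hep : ch = p
    · subst hep
      rw [if_neg (by simp), if_neg (by simp)]
      exact ih (pre ++ [ch]) _ ans runs ch (fun c hc => hlS c (by simp [hc]))
        (fun c hc => by
          rcases List.mem_append.mp hc with h | h
          · exact hpS c h
          · simp at h; subst h; exact hchS)
        hlen' hcnt'
        (by simp) (fun c => by
          rw [hruns c]
          constructor
          · intro h; exact List.mem_append_left _ h
          · intro h
            rcases List.mem_append.mp h with h | h
            · exact h
            · simp at h; subst h; exact hppre)
        hans c
    · rw [if_pos (show ch ≠ p from hep)]
      have hmem : (PySem.List.pyGetD cnt ((ch.toNat : Int) - 97) 0 > 0 ∧ ch ≠ p) ↔ ch ∈ pre := by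
        rw [hcount]
        constructor
        · intro h
          exact List.count_pos_iff.mp (by exact_mod_cast h.1)
        · intro h
          exact ⟨by exact_mod_cast List.count_pos_iff.mpr h, hep⟩
      have hruns' : ∀ c', c' ∈ runs ++ [ch] ↔ c' ∈ pre ++ [ch] := by
        intro c'
        simp [hruns c']
      have hans' : ∀ c', c' ∈ (if PySem.List.pyGetD cnt ((ch.toNat : Int) - 97) 0 > 0 ∧ ch ≠ p
          then ans ++ [ch] else ans) ↔ 2 ≤ (runs ++ [ch]).count c' := by
        intro c'
        by_cases he : c' = ch
        · subst he
          have hc1 : (runs ++ [c']).count c' = runs.count c' + 1 := by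
            simp [List.count_append]
          rw [hc1]
          by_cases hin : c' ∈ pre
          · rw [if_pos (hmem.mpr hin)]
            have h1 : 1 ≤ runs.count c' := List.count_pos_iff.mpr ((hruns c').mpr hin)
            simp only [List.mem_append, List.mem_singleton]
            constructor
            · intro _; omega
            · intro _; simp
          · rw [if_neg (fun h => hin (hmem.mp h))]
            have h1 : runs.count c' = 0 := by
              rw [List.count_eq_zero]
              intro hc
              exact hin ((hruns c').mp hc)
            have h2 : c' ∉ ans := by
              intro hc
              have := (hans c').mp hc
              omega
            constructor
            · intro hc; exact absurd hc h2
            · intro hc; omega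
        · have he' : ¬ch = c' := fun h => he h.symm
          have hcc : (runs ++ [ch]).count c' = runs.count c' := by
            simp [List.count_append, he']
          rw [hcc]
          split_ifs with hif
          · simp only [List.mem_append, List.mem_singleton]
            constructor
            · intro h
              rcases h with h | h
              · exact (hans c').mp h
              · exact absurd h he
            · intro h
              exact Or.inl ((hans c').mpr h)
          · exact hans c'
      exact ih (pre ++ [ch]) _ _ (runs ++ [ch]) ch (fun c hc => hlS c (by simp [hc]))
        (fun c hc => by
          rcases List.mem_append.mp hc with h | h
          · exact hpS c h
          · simp at h; subst h; exact hchS)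
        hlen' hcnt'
        (by simp) hruns' hans' c

-- ===== VERDICT (by name: the statement is the Claim_ definition above) =====
theorem solution_spec : Claim_equal_solution := by
  intro input_string _ hpre
  obtain ⟨hne, hvb, hnd⟩ := hpre
  unfold Spec_solution solution solution_alt
  rcases h : input_string.toList with _ | ⟨c, rest⟩
  · exact absurd h hne
  simp only [h]
  have hvS : ∀ x ∈ c :: rest, 71 ≤ x.toNat ∧ x.toNat ≤ 122 := by
    intro x hx
    have := List.all_eq_true.mp hvb x (h ▸ hx)
    simp at this
    exact this
  have hD : ∀ x ∈ c :: rest, x.toNat < 97 → Char.ofNat (x.toNat + 26) ∉ c :: rest := by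
    intro x hx hlt hmem
    rw [← Bool.not_eq_true, List.any_eq_true] at hnd
    apply hnd
    refine ⟨x, h ▸ hx, ?_⟩
    simp only [Bool.and_eq_true, decide_eq_true_eq, List.contains_eq_mem]
    exact ⟨hlt, by rw [h]; exact hmem⟩
  have hno : ∀ x ∈ c :: rest, ∀ y ∈ c :: rest, pvIdx x = pvIdx y → x = y := by
    intro x hx y hy hxy
    have hbx := hvS x hx
    have hby := hvS y hy
    unfold pvIdx at hxy
    split_ifs at hxy with h1 h2 h2
    · exact pvCharEq x y (by omega)
    · -- x in 71..96, y in 97..122, y.toNat = x.toNat + 26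
      exfalso
      have : Char.ofNat (x.toNat + 26) = y := by
        have hyv : y.toNat = x.toNat + 26 := by omega
        rw [← hyv, Char.ofNat_toNat]
      exact hD x hx h1 (this ▸ hy)
    · exfalso
      have : Char.ofNat (y.toNat + 26) = x := by
        have hxv : x.toNat = y.toNat + 26 := by omega
        rw [← hxv, Char.ofNat_toNat]
      exact hD y hy h2 (this ▸ hx)
    · exact pvCharEq x y (by omega)
  have hcS : c ∈ c :: rest := by simp
  have hc : 71 ≤ c.toNat ∧ c.toNat ≤ 122 := hvS c hcS
  -- head character of A's indexing
  have hget0 : PySem.List.pyGetD (c :: rest) (0 : Int) ' ' = c := by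
    rw [PySem.List.pyGetD_ofNat']; rfl
  rw [hget0]
  -- initial counter
  set cnt0 := PySem.List.pySetD (List.replicate 26 (0 : Int)) ((c.toNat : Int) - 97)
      (PySem.List.pyGetD (List.replicate 26 (0 : Int)) ((c.toNat : Int) - 97) 0 + 1) with hcnt0def
  have hrep : ∀ j : Int, PySem.List.pyGetD (List.replicate 26 (0 : Int)) j 0 = 0 :=
    pvGetDZero _ (fun v hv => (List.eq_of_mem_replicate hv))
  have hrlen : (List.replicate 26 (0 : Int)).length = 26 := by simp
  have hjlt : pvIdx c < (List.replicate 26 (0 : Int)).length := by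
    rw [hrlen]; exact pvIdx_lt c hc
  have hlen0 : cnt0.length = 26 := by
    rw [hcnt0def, PySem.List.length_pySetD, List.length_replicate]
  have hcnt0 : ∀ c' ∈ c :: rest,
      PySem.List.pyGetD cnt0 ((c'.toNat : Int) - 97) 0 = (([c].count c' : Nat) : Int) := by
    intro c' hc'S
    have hc' : 71 ≤ c'.toNat ∧ c'.toNat ≤ 122 := hvS c' hc'S
    rw [hcnt0def, pvWrapSetD _ hrlen c _ hc, pvWrapGetD _ (by rw [PySem.List.length_pySetD]; exact hrlen) c' hc',
      PySem.List.pyGetD_pySetD_natCast _ _ _ _ _ hjlt]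
    by_cases he : c' = c
    · subst he
      rw [if_pos rfl, hrep]
      simp
    · have hne2 : pvIdx c' ≠ pvIdx c := by
        intro hcon
        exact he (hno c' hc'S c hcS hcon)
      have he' : ¬c = c' := fun hx => he hx.symm
      rw [if_neg hne2, ← pvWrapGetD _ hrlen c' hc', hrep]
      simp [he']
  -- A's loop as pvAFold
  have hA := pvA_bridge (c :: rest) rest 0 c (cnt0, []) (by simp)
  rw [show ((0 : Nat) : Int) + 1 = (1 : Int) by norm_num] at hA
  rw [hA]
  -- B's loop as pvRuns
  rw [pvB_bridge rest [c] c]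
  -- the invariant
  have hAB := pvInv (c :: rest) hvS hno rest [c] cnt0 [] [c] c
    (fun x hx => List.mem_cons_of_mem c hx)
    (fun x hx => by simp at hx; simp [hx])
    hlen0 hcnt0 (by simp)
    (fun c' => Iff.rfl)
    (fun c' => by
      constructor
      · intro hx; exact absurd hx (List.not_mem_nil)
      · intro hx
        have := List.count_le_length (l := [c]) (a := c')
        simp at this
        omega)
  -- B's counting dict is Counter(runs)
  rw [PySem.Dict.foldl_insert_getD_add_one_eq_counter]
  set runsF := pvRuns rest c [c] with hrunsdef
  set ansF := (pvAFold rest c (cnt0, [])).2 with hansdef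
  have hkeys : (PySem.Dict.counter runsF).keys = PySem.Set.ofList runsF :=
    PySem.Dict.keys_counter runsF
  rw [hkeys]
  -- the two sorted lists coincide
  have hperm : (PySem.Set.ofList ansF).Perm
      ((PySem.Set.ofList runsF).filter (fun ch => decide ((PySem.Dict.counter runsF).getD ch 0 > 1))) := by
    rw [List.perm_ext_iff_of_nodup (PySem.Set.nodup_ofList ansF)
      ((PySem.Set.nodup_ofList runsF).filter _)]
    intro a
    rw [PySem.Set.mem_ofList, List.mem_filter, PySem.Set.mem_ofList, hAB a,
      PySem.Dict.getD_counter]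
    constructor
    · intro hx
      refine ⟨List.count_pos_iff.mp (by omega), by simp; exact_mod_cast hx⟩
    · intro ⟨_, hx⟩
      simp at hx
      exact_mod_cast hx
  have hsorted : PySem.List.sorted (PySem.Set.ofList ansF) (fun x => x) false
      = PySem.List.sorted ((PySem.Set.ofList runsF).filter
          (fun ch => decide ((PySem.Dict.counter runsF).getD ch 0 > 1))) (fun x => x) false :=
    PySem.List.sorted_eq_sorted_of_perm _ _ _ (fun _ _ hx => hx) hperm
  rw [hsorted]
  split_ifs with h1 h2 h2
  · rfl
  · exact absurd (List.length_eq_zero_iff.mp h1) h2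
  · exact absurd (List.length_eq_zero_iff.mpr h2) h1
  · rfl
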